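-- pv_equiv track=rewrite | github.com/harrytflv/foobar | level3/queue-to-do/solution.py | slow_solution
-- ===== SOURCE A (Python) =====
-- def slow_solution(start, num):
-- 	counter, ret = start, 0
-- 	for i in range(num):
-- 		for j in range(num - i):
-- 			ret ^= counter
-- 			counter += 1
-- 		counter += i
-- 	return ret
-- ===== SOURCE B (Python) =====
-- def slow_solution(start, num):
--     # prefix-XOR closed form per row: O(num) instead of A's O(num^2)
--     def F(n):  # XOR of 0..n-1 for n >= 0
--         r = n % 4
--         if r == 0:
--             return 0
--         if r == 1:
--             return n - 1
--         if r == 2: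
--             return 1
--         return n
--     def C(n):  # cumulative XOR: XOR of [0,n) if n >= 0 else XOR of [n,0)
--         if n >= 0:
--             return F(n)
--         k = -n
--         return (F(k) ^ -1) if k % 2 else F(k)
--     ret = 0
--     for i in range(num):
--         lo = start + i * num
--         ret ^= C(lo) ^ C(lo + num - i)
--     return ret
-- ===== Notes on version B (the rewrite author's own statement) =====
-- stated objective: faster
-- what changed: Replaces the O(num^2) element-by-element XOR accumulation with one O(1) prefix-XOR (n mod 4) closed form per contiguous row range, a single O(num) loop.
import Mathlib
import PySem

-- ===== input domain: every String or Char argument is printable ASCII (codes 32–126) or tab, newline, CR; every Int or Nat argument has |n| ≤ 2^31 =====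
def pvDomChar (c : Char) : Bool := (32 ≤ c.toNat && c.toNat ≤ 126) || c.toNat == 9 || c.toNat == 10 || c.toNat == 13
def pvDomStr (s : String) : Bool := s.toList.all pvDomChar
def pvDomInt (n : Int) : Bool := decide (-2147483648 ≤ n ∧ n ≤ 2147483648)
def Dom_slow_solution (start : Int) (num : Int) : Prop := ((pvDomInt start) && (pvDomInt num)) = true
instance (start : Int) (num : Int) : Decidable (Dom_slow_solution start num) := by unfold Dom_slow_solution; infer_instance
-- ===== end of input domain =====

-- B replaces A's O(num^2) element-by-element XOR with one O(1) prefix-XOR closed form per row (O(num) total).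

-- ===== PORT A =====
def slow_solution (start : Int) (num : Int) : Int :=
  -- counter, ret = start, 0; nested for-loops, each inner step: ret ^= counter; counter += 1; then counter += i
  let s := (PySem.List.pyRange 0 num 1).foldl
    (fun (s : Int × Int) i =>
      let s2 := (PySem.List.pyRange 0 (num - i) 1).foldl
        (fun (t : Int × Int) _j => (t.1 + 1, PySem.Int.bxor t.2 t.1)) s
      (s2.1 + i, s2.2))
    (start, 0)
  s.2

-- ===== PORT B =====
-- F(n) = XOR of 0..n-1 for n >= 0, by the n mod 4 table
def pyF (n : Int) : Int :=
  let r := PySem.Int.mod n 4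
  if r = 0 then 0 else if r = 1 then n - 1 else if r = 2 then 1 else n

-- C(n) = cumulative XOR: XOR of [0,n) if n >= 0 else XOR of [n,0)
def pyC (n : Int) : Int :=
  if 0 ≤ n then pyF n
  else
    let k := -n
    if ¬ (PySem.Int.mod k 2 = 0) then PySem.Int.bxor (pyF k) (-1) else pyF k

def slow_solution_alt (start : Int) (num : Int) : Int :=
  (PySem.List.pyRange 0 num 1).foldl
    (fun r i =>
      let lo := start + i * num
      PySem.Int.bxor r (PySem.Int.bxor (pyC lo) (pyC (lo + num - i)))) 0

-- ===== PRECONDITION & SPEC =====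
def Spec_slow_solution (start : Int) (num : Int) (out : Int) : Prop := out = slow_solution_alt start num
instance (start : Int) (num : Int) (out : Int) : Decidable (Spec_slow_solution start num out) := by unfold Spec_slow_solution; infer_instance

-- ===== CLAIM (what is proved, stated in full; the proofs are below) =====
def Claim_equal_slow_solution : Prop := ∀ (start : Int) (num : Int), Dom_slow_solution start num → Spec_slow_solution start num (slow_solution start num)

-- ===== LEMMAS AND PROOFS =====

-- every Int is a natCast or the complement of one
theorem int_rep (a : Int) : (∃ m : Nat, a = (m : Int)) ∨ (∃ m : Nat, a = -(m : Int) - 1) := by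
  rcases a with m | m
  · exact Or.inl ⟨m, rfl⟩
  · exact Or.inr ⟨m, by rw [Int.negSucc_eq]; ring⟩

-- case forms of PySem.Int.bxor on the four sign combinations
theorem bxor_np (m n : Nat) :
    PySem.Int.bxor (m : Int) (-(n : Int) - 1) = -((m ^^^ n : Nat) : Int) - 1 := by
  simp only [PySem.Int.bxor]
  rw [if_pos (by omega), if_neg (by omega)]
  have h1 : (-(-(n:Int) - 1) - 1) = (n : Int) := by ring
  rw [h1]
  simp

theorem bxor_pn (m n : Nat) :
    PySem.Int.bxor (-(m : Int) - 1) (n : Int) = -((m ^^^ n : Nat) : Int) - 1 := by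
  simp only [PySem.Int.bxor]
  rw [if_neg (by omega), if_pos (by omega)]
  have h1 : (-(-(m:Int) - 1) - 1) = (m : Int) := by ring
  rw [h1]
  simp

theorem bxor_nn (m n : Nat) :
    PySem.Int.bxor (-(m : Int) - 1) (-(n : Int) - 1) = ((m ^^^ n : Nat) : Int) := by
  simp only [PySem.Int.bxor]
  rw [if_neg (by omega), if_neg (by omega)]
  have h1 : (-(-(m:Int) - 1) - 1) = (m : Int) := by ring
  have h2 : (-(-(n:Int) - 1) - 1) = (n : Int) := by ring
  rw [h1, h2]
  simp

theorem bxor_assoc (a b c : Int) :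
    PySem.Int.bxor (PySem.Int.bxor a b) c = PySem.Int.bxor a (PySem.Int.bxor b c) := by
  rcases int_rep a with ⟨x, rfl⟩ | ⟨x, rfl⟩ <;>
    rcases int_rep b with ⟨y, rfl⟩ | ⟨y, rfl⟩ <;>
      rcases int_rep c with ⟨z, rfl⟩ | ⟨z, rfl⟩ <;>
        simp only [PySem.Int.bxor_natCast, bxor_np, bxor_pn, bxor_nn, Nat.xor_assoc]

theorem zero_bxor (a : Int) : PySem.Int.bxor 0 a = a := by
  rw [PySem.Int.bxor_comm, PySem.Int.bxor_zero]

theorem bxor_cancel_left (a b : Int) : PySem.Int.bxor a (PySem.Int.bxor a b) = b := by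
  rw [← bxor_assoc, PySem.Int.bxor_self, zero_bxor]

theorem bxor_left_comm (a b c : Int) :
    PySem.Int.bxor a (PySem.Int.bxor b c) = PySem.Int.bxor b (PySem.Int.bxor a c) := by
  rw [← bxor_assoc, PySem.Int.bxor_comm a b, bxor_assoc]

theorem nat_two_mul_xor_one (k : Nat) : (2 * k) ^^^ 1 = 2 * k + 1 := by
  apply Nat.eq_of_testBit_eq
  intro i
  cases i with
  | zero => simp [Nat.testBit_zero]
  | succ j => simp [Nat.testBit_succ, Nat.mul_add_div]

theorem nat_xor_succ_of_even (k : Nat) : (2 * k) ^^^ (2 * k + 1) = 1 := by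
  conv_lhs => rw [← nat_two_mul_xor_one k]
  rw [← Nat.xor_assoc, Nat.xor_self, Nat.zero_xor]

-- bxor with -1 is two's-complement NOT on nonnegatives
theorem bxor_neg_one (a : Int) (ha : 0 ≤ a) : PySem.Int.bxor a (-1) = -a - 1 := by
  obtain ⟨m, rfl⟩ : ∃ m : Nat, a = (m : Int) := ⟨a.toNat, by omega⟩
  have h : (-1 : Int) = -((0 : Nat) : Int) - 1 := by norm_num
  rw [h, bxor_np]
  simp

-- PySem.Int.mod with a positive divisor is emod
theorem pymod_pos (a b : Int) (hb : 0 < b) : PySem.Int.mod a b = a % b := by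
  simp only [PySem.Int.mod]
  rw [Int.fmod_eq_emod, if_pos (Or.inl hb.le), add_zero]

-- the key step identity for F on nonnegatives
theorem pyF_succ (n : Int) (hn : 0 ≤ n) : pyF (n + 1) = PySem.Int.bxor (pyF n) n := by
  have hm : PySem.Int.mod n 4 = n % 4 := pymod_pos n 4 (by norm_num)
  have hm1 : PySem.Int.mod (n+1) 4 = (n+1) % 4 := pymod_pos (n+1) 4 (by norm_num)
  have hr : n % 4 = 0 ∨ n % 4 = 1 ∨ n % 4 = 2 ∨ n % 4 = 3 := by omega
  rcases hr with h | h | h | h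
  · -- F n = 0, F (n+1) = n
    have h1 : (n+1) % 4 = 1 := by omega
    simp only [pyF, hm, hm1, h, h1]
    norm_num [zero_bxor]
  · -- F n = n - 1, F (n+1) = 1 : (n-1) ^ n = 1 with n odd
    have h2 : (n+1) % 4 = 2 := by omega
    simp only [pyF, hm, hm1, h, h2]
    norm_num
    obtain ⟨k, rfl⟩ : ∃ k : Nat, n = ((2*k+1 : Nat) : Int) := ⟨((n-1)/2).toNat, by push_cast; omega⟩
    have hsub : ((2*k+1 : Nat) : Int) - 1 = ((2*k : Nat) : Int) := by push_cast; ring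
    rw [hsub, PySem.Int.bxor_natCast, nat_xor_succ_of_even]
    norm_num
  · -- F n = 1, F (n+1) = n+1 : 1 ^ n = n + 1 with n even
    have h3 : (n+1) % 4 = 3 := by omega
    simp only [pyF, hm, hm1, h, h3]
    norm_num
    obtain ⟨k, rfl⟩ : ∃ k : Nat, n = ((2*k : Nat) : Int) := ⟨(n/2).toNat, by push_cast; omega⟩
    rw [PySem.Int.bxor_comm]
    have h1 : (1 : Int) = ((1 : Nat) : Int) := by norm_num
    rw [h1, PySem.Int.bxor_natCast, nat_two_mul_xor_one]
    push_cast
    ring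
  · -- F n = n, F (n+1) = 0 : n ^ n = 0
    have h0 : (n+1) % 4 = 0 := by omega
    simp only [pyF, hm, hm1, h, h0]
    norm_num [PySem.Int.bxor_self]

-- the cumulative-XOR step identity, on all of Int
theorem pyC_succ (n : Int) : pyC (n + 1) = PySem.Int.bxor (pyC n) n := by
  by_cases hn : 0 ≤ n
  · have hL : pyC (n + 1) = pyF (n + 1) := by simp only [pyC]; rw [if_pos (by omega)]
    have hR : pyC n = pyF n := by simp only [pyC]; rw [if_pos hn]
    rw [hL, hR]
    exact pyF_succ n hn
  · replace hn : n < 0 := by omega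
    by_cases h0 : n = -1
    · subst h0
      have hL : pyC ((-1 : Int) + 1) = 0 := by norm_num [pyC, pyF, pymod_pos]
      have hmod : PySem.Int.mod (-(-1 : Int)) 2 = 1 := by
        rw [pymod_pos _ _ (by norm_num)]; decide
      have hR : pyC (-1 : Int) = -1 := by
        simp only [pyC]
        rw [if_neg (by norm_num)]
        simp only [hmod]
        rw [if_pos (by norm_num)]
        have : pyF (-(-1 : Int)) = 0 := by norm_num [pyF, pymod_pos]
        rw [this, zero_bxor]
      rw [hL, hR, PySem.Int.bxor_self]
    · -- n ≤ -2 : both sides in the negative branch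
      have hk2 : 2 ≤ -n := by omega
      have hmodk : PySem.Int.mod (-n) 2 = (-n) % 2 := pymod_pos _ _ (by norm_num)
      have hmodk1 : PySem.Int.mod (-(n+1)) 2 = (-(n+1)) % 2 := pymod_pos _ _ (by norm_num)
      have hF : pyF (-n) = PySem.Int.bxor (pyF (-n - 1)) (-n - 1) := by
        have h := pyF_succ (-n - 1) (by omega)
        have e : -n - 1 + 1 = -n := by ring
        rw [e] at h
        exact h
      have hlnot : PySem.Int.bxor (-n - 1) (-1) = n := by
        rw [bxor_neg_one (-n - 1) (by omega)]; ring
      by_cases hpar : (-n) % 2 = 0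
      · -- -n even, -(n+1) odd
        have hL : pyC (n + 1) = PySem.Int.bxor (pyF (-n - 1)) (-1) := by
          simp only [pyC]
          rw [if_neg (by omega)]
          have e : -(n + 1) = -n - 1 := by ring
          simp only [hmodk1]
          rw [if_pos (by omega), e]
        have hR : pyC n = pyF (-n) := by
          simp only [pyC]
          rw [if_neg (by omega)]
          simp only [hmodk]
          rw [if_neg (by omega)]
        have key : PySem.Int.bxor (-n - 1) n = -1 := by
          have hcl := bxor_cancel_left (-n - 1) (-1)
          rw [hlnot] at hcl
          exact hcl
        rw [hL, hR, hF, bxor_assoc]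
        congr 1
        exact key.symm
      · -- -n odd, -(n+1) even
        have hL : pyC (n + 1) = pyF (-n - 1) := by
          simp only [pyC]
          rw [if_neg (by omega)]
          have e : -(n + 1) = -n - 1 := by ring
          simp only [hmodk1]
          rw [if_neg (by omega), e]
        have hR : pyC n = PySem.Int.bxor (pyF (-n)) (-1) := by
          simp only [pyC]
          rw [if_neg (by omega)]
          simp only [hmodk]
          rw [if_pos (by omega)]
        rw [hL, hR, hF, bxor_assoc, bxor_assoc]
        conv_lhs => rw [← PySem.Int.bxor_zero (pyF (-n - 1))]
        congr 1
        rw [← bxor_assoc, hlnot, PySem.Int.bxor_self]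

-- the inner loop of A XORs a block of consecutive counters: closed form via pyC
theorem inner_loop (l : List Int) (c r : Int) :
    l.foldl (fun (t : Int × Int) _j => (t.1 + 1, PySem.Int.bxor t.2 t.1)) (c, r)
      = (c + l.length, PySem.Int.bxor r (PySem.Int.bxor (pyC c) (pyC (c + l.length)))) := by
  induction l generalizing c r with
  | nil => simp [PySem.Int.bxor_self, PySem.Int.bxor_zero]
  | cons x xs ih =>
    simp only [List.foldl_cons, List.length_cons]
    rw [ih (c + 1) (PySem.Int.bxor r c)]
    have e2 : c + 1 + (xs.length : Int) = c + ((xs.length + 1 : Nat) : Int) := by push_cast; ring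
    rw [e2, pyC_succ c]
    congr 1
    rw [bxor_assoc, bxor_assoc, bxor_left_comm c (pyC c), bxor_cancel_left]

-- the outer loops agree, by induction on the number of remaining iterations
theorem outer_loop (start num : Int) : ∀ (t : Nat) (j : Int), 0 ≤ j → j + (t : Int) = num →
    ∀ r : Int,
    ((PySem.List.pyRange j num 1).foldl
      (fun (s : Int × Int) i =>
        let s2 := (PySem.List.pyRange 0 (num - i) 1).foldl
          (fun (t : Int × Int) _j => (t.1 + 1, PySem.Int.bxor t.2 t.1)) s
        (s2.1 + i, s2.2))
      (start + j * num, r)).2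
    = (PySem.List.pyRange j num 1).foldl
        (fun r i =>
          let lo := start + i * num
          PySem.Int.bxor r (PySem.Int.bxor (pyC lo) (pyC (lo + num - i)))) r := by
  intro t
  induction t with
  | zero =>
    intro j hj hjt r
    have he : PySem.List.pyRange j num 1 = [] := by
      rw [PySem.List.pyRange_one]
      have : (num - j).toNat = 0 := by omega
      rw [this]; rfl
    rw [he]; rfl
  | succ t ih =>
    intro j hj hjt r
    have hlt : j < num := by omega
    rw [PySem.List.pyRange_one_cons (by omega)]
    simp only [List.foldl_cons]
    rw [inner_loop]
    have hlen : ((PySem.List.pyRange 0 (num - j) 1).length : Int) = num - j := by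
      rw [PySem.List.length_pyRange_one]; omega
    rw [hlen]
    have hc : start + j * num + (num - j) + j = start + (j + 1) * num := by ring
    rw [hc]
    have h := ih (j + 1) (by omega) (by push_cast at hjt ⊢; omega)
      (PySem.Int.bxor r (PySem.Int.bxor (pyC (start + j * num)) (pyC (start + j * num + (num - j)))))
    rw [h]
    have e1 : start + j * num + (num - j) = start + j * num + num - j := by ring
    rw [e1]

-- ===== VERDICT (by name: the statement is the Claim_ definition above) =====
theorem slow_solution_spec : Claim_equal_slow_solution := by
  intro start num _
  unfold Spec_slow_solution slow_solution slow_solution_alt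
  by_cases h : 0 ≤ num
  · have h0 : start + 0 * num = start := by ring
    have hmain := outer_loop start num num.toNat 0 le_rfl (by omega) 0
    rw [h0] at hmain
    exact hmain
  · have he : PySem.List.pyRange 0 num 1 = [] := by
      rw [PySem.List.pyRange_one]
      have : (num - 0).toNat = 0 := by omega
      rw [this]; rfl
    rw [he]; rfl
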